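-- pv_equiv track=rewrite | github.com/sclorg/nginx-container | test/dockerfile_processor.py | validate_dockerfile_syntax
-- ===== SOURCE A (Python) =====
-- def validate_dockerfile_syntax(content: str) -> bool:
--     """
--     Basic validation of Dockerfile syntax.
--
--     Args:
--         content: Dockerfile content to validate
--
--     Returns:
--         True if basic syntax checks pass, False otherwise
--     """
--     lines = content.strip().split('\n')
--
--     # Check for basic Dockerfile structure
--     has_from = any(line.strip().upper().startswith('FROM') for line in lines)
--     if not has_from:
--         return False
--
--     # Check for valid instruction format
--     valid_instructions = {
--         'FROM', 'RUN', 'CMD', 'LABEL', 'EXPOSE', 'ENV', 'ADD', 'COPY',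
--         'ENTRYPOINT', 'VOLUME', 'USER', 'WORKDIR', 'ARG', 'ONBUILD',
--         'STOPSIGNAL', 'HEALTHCHECK', 'SHELL'
--     }
--
--     for line in lines:
--         line = line.strip()
--         if not line or line.startswith('#'):
--             continue
--
--         # Extract the instruction (first word)
--         instruction = line.split()[0].upper()
--         if instruction not in valid_instructions:
--             return False
--
--     return True
-- ===== SOURCE B (Python) =====
-- VALID_INSTRUCTIONS = frozenset({
--     'FROM', 'RUN', 'CMD', 'LABEL', 'EXPOSE', 'ENV', 'ADD', 'COPY',
--     'ENTRYPOINT', 'VOLUME', 'USER', 'WORKDIR', 'ARG', 'ONBUILD',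
--     'STOPSIGNAL', 'HEALTHCHECK', 'SHELL'
-- })
--
--
-- def validate_dockerfile_syntax(content: str) -> bool:
--     """Basic Dockerfile syntax validation: one fused pass with an accumulator."""
--     seen_from = False
--     for line in content.strip().split('\n'):
--         s = line.strip()
--         if s and not s.startswith('#'):
--             w = s.split()[0].upper()
--             if w not in VALID_INSTRUCTIONS:
--                 return False
--             seen_from = seen_from or w == 'FROM'
--     return seen_from
-- ===== Notes on version B (the rewrite author's own statement) =====
-- stated objective: simpler
-- what changed: Fuses A's two staged scans (an any() startswith('FROM') pass over all lines plus a separate early-return validation loop) into a single pass carrying a seen_from accumulator, detecting FROM by exact equality of the first word (valid because the only valid instruction with prefix FROM is FROM itself).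
import Mathlib
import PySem

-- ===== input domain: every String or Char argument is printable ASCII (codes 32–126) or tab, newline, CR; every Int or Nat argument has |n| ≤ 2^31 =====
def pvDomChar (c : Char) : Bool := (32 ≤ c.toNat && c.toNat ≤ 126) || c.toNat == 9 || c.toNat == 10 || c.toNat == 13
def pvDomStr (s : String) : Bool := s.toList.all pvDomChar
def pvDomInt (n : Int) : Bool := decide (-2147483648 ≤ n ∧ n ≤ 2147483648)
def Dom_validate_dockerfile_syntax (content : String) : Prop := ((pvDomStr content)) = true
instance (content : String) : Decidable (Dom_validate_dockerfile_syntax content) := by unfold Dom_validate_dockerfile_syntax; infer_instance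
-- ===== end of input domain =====

-- B fuses A's two staged scans (the any() startswith('FROM') pass and the separate early-return
-- validation loop) into a single pass carrying a seen_from accumulator, testing the exact first
-- word against 'FROM' (objective: simpler).

-- ===== PORT A =====
-- the valid_instructions set of the Python source (shared constant)
def vdsValid : List String :=
  ["FROM", "RUN", "CMD", "LABEL", "EXPOSE", "ENV", "ADD", "COPY",
   "ENTRYPOINT", "VOLUME", "USER", "WORKDIR", "ARG", "ONBUILD",
   "STOPSIGNAL", "HEALTHCHECK", "SHELL"]

-- A's 'for line in lines: …' early-return loop
def vdsCheckLoop : List String → Bool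
  | [] => true
  | line :: rest =>
    let s := PySem.Str.strip line
    if s == "" || PySem.Str.startswith s "#" then vdsCheckLoop rest
    else
      -- line.split()[0].upper(); the 'none' arm is unreachable (s is stripped and nonempty)
      match PySem.List.pyGet? (PySem.Str.split₀ s) 0 with
      | some w =>
        if (vdsValid.contains (PySem.Str.upper w)) = false then false else vdsCheckLoop rest
      | none => true

def validate_dockerfile_syntax (content : String) : Bool :=
  -- content.strip().split('\n'); split? is never none since the separator is nonempty
  let lines := (PySem.Str.split? (PySem.Str.strip content) "\n").getD []
  let has_from := lines.any (fun line =>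
    PySem.Str.startswith (PySem.Str.upper (PySem.Str.strip line)) "FROM")
  if !has_from then false
  else vdsCheckLoop lines

-- ===== PORT B =====
-- Source B's single for-loop over the lines, carrying the seen_from accumulator
def vdsBLoop : List String → Bool → Bool
  | [], seen => seen
  | line :: rest, seen =>
    let s := PySem.Str.strip line
    if s != "" && !(PySem.Str.startswith s "#") then
      match PySem.List.pyGet? (PySem.Str.split₀ s) 0 with
      | some w0 =>
        let w := PySem.Str.upper w0
        if !(vdsValid.contains w) then false
        else vdsBLoop rest (seen || (w == "FROM"))
      | none => vdsBLoop rest seen  -- unreachable: s is stripped and nonempty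
    else vdsBLoop rest seen

def validate_dockerfile_syntax_alt (content : String) : Bool :=
  vdsBLoop ((PySem.Str.split? (PySem.Str.strip content) "\n").getD []) false

-- ===== PRECONDITION & SPEC =====
def Spec_validate_dockerfile_syntax (content : String) (out : Bool) : Prop := out = validate_dockerfile_syntax_alt content
instance (content : String) (out : Bool) : Decidable (Spec_validate_dockerfile_syntax content out) := by unfold Spec_validate_dockerfile_syntax; infer_instance

-- ===== CLAIM (what is proved, stated in full; the proofs are below) =====
def Claim_equal_validate_dockerfile_syntax : Prop := ∀ (content : String), Dom_validate_dockerfile_syntax content → Spec_validate_dockerfile_syntax content (validate_dockerfile_syntax content)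

-- ===== LEMMAS AND PROOFS =====

-- the first word (uppercased) of a code line; none for blank/comment lines (proof-only helper)
def vdsWord (line : String) : Option String :=
  let s := PySem.Str.strip line
  if s != "" && !(PySem.Str.startswith s "#") then
    (PySem.List.pyGet? (PySem.Str.split₀ s) 0).map PySem.Str.upper
  else none

-- an uppercased char equal to one of 'F','R','O','M' came from a non-space char
lemma vds_upperChar_nonspace {c x : Char} (hx : x ∈ ['F', 'R', 'O', 'M'])
    (h : PySem.Chars.upperChar c = x) : PySem.Chars.isspace c = false := by
  unfold PySem.Chars.upperChar at h
  split at h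
  · rename_i hl
    simp only [PySem.Chars.islower, Bool.and_eq_true, decide_eq_true_eq, Char.le_def] at hl
    simp only [PySem.Chars.isspace, Bool.or_eq_false_iff, Bool.and_eq_false_iff,
      decide_eq_false_iff_not]
    have h1 : 97 ≤ c.val.toNat := hl.1
    have h2 : c.val.toNat ≤ 122 := hl.2
    simp only [Char.toNat] at *
    omega
  · subst h
    fin_cases hx <;> decide

-- the head of a dropWhile falsifies the predicate
lemma vds_head?_dropWhile {q : Char → Bool} {l : List Char} {c : Char}
    (h : (List.dropWhile q l).head? = some c) : q c = false := by
  have hne : List.dropWhile q l ≠ [] := by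
    intro hx; rw [hx] at h; simp at h
  have hd := List.head_dropWhile_not q hne
  rw [List.head?_eq_some_head hne, Option.some_inj] at h
  rw [h] at hd
  exact hd

-- split₀.go always returns acc.reverse ++ something
lemma vds_go_acc : ∀ (s cur : List Char) (acc : List (List Char)),
    ∃ r, PySem.Chars.split₀.go s cur acc = acc.reverse ++ r := by
  intro s
  induction s with
  | nil =>
    intro cur acc
    rw [PySem.Chars.split₀.go]
    split
    · exact ⟨[], by simp⟩
    · exact ⟨[cur.reverse], by simp⟩
  | cons c rest ih =>
    intro cur acc
    rw [PySem.Chars.split₀.go]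
    split
    · split
      · exact ih [] acc
      · obtain ⟨r, hr⟩ := ih [] (cur.reverse :: acc)
        exact ⟨cur.reverse :: r, by simp [hr]⟩
    · exact ih (c :: cur) acc

-- accumulating the current token through its non-space prefix
lemma vds_go_take : ∀ (s cur : List Char) (acc : List (List Char)),
    PySem.Chars.split₀.go s cur acc =
      PySem.Chars.split₀.go (s.dropWhile (fun c => !PySem.Chars.isspace c))
        ((s.takeWhile (fun c => !PySem.Chars.isspace c)).reverse ++ cur) acc := by
  intro s
  induction s with
  | nil => intro cur acc; simp
  | cons c rest ih =>
    intro cur acc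
    by_cases hc : PySem.Chars.isspace c = true
    · simp [hc]
    · rw [PySem.Chars.split₀.go]
      simp only [List.dropWhile_cons, List.takeWhile_cons, Bool.not_eq_true] at *
      simp [hc, ih (c :: cur) acc]

-- the first token of split₀ on a string whose head is non-space
lemma vds_split₀_head (s : List Char) (hne : s ≠ [])
    (hh : ∀ c, s.head? = some c → PySem.Chars.isspace c = false) :
    ∃ tail, PySem.Chars.split₀ s =
      s.takeWhile (fun c => !PySem.Chars.isspace c) :: tail := by
  unfold PySem.Chars.split₀
  rw [vds_go_take]
  set p : Char → Bool := fun c => !PySem.Chars.isspace c with hp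
  have htk : s.takeWhile p ≠ [] := by
    cases s with
    | nil => exact absurd rfl hne
    | cons a t =>
      have := hh a (by simp)
      simp [hp, this]
  cases hdrop : s.dropWhile p with
  | nil =>
    rw [PySem.Chars.split₀.go]
    simp [htk]
  | cons d dt =>
    have hd : PySem.Chars.isspace d = true := by
      have := vds_head?_dropWhile (q := p) (l := s) (c := d) (by rw [hdrop]; rfl)
      simpa [hp] using this
    rw [PySem.Chars.split₀.go]
    rw [if_pos hd, if_neg (by simp [htk])]
    obtain ⟨r, hr⟩ := vds_go_acc dt [] [((s.takeWhile p).reverse ++ []).reverse]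
    rw [hr]
    exact ⟨r, by simp⟩

-- FROM-prefix of the uppercased line ↔ FROM-prefix of its uppercased first word
lemma vds_take_from (s : List Char) :
    PySem.Chars.startswith
      (PySem.Chars.upper (s.takeWhile (fun c => !PySem.Chars.isspace c)))
      "FROM".toList =
    PySem.Chars.startswith (PySem.Chars.upper s) "FROM".toList := by
  rw [Bool.eq_iff_iff]
  simp only [PySem.Chars.startswith_iff]
  constructor
  · intro h
    exact h.trans (List.IsPrefix.map _ (List.takeWhile_prefix _))
  · intro h
    obtain ⟨r, hr⟩ := h
    unfold PySem.Chars.upper at hr ⊢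
    rw [show "FROM".toList = ['F','R','O','M'] from rfl] at hr ⊢
    cases s with
    | nil => simp at hr
    | cons c1 s1 =>
    cases s1 with
    | nil => simp at hr
    | cons c2 s2 =>
    cases s2 with
    | nil => simp at hr
    | cons c3 s3 =>
    cases s3 with
    | nil => simp at hr
    | cons c4 t =>
    simp only [List.map_cons, List.cons_append, List.nil_append, List.cons.injEq] at hr
    obtain ⟨h1, h2, h3, h4, _⟩ := hr
    have n1 := vds_upperChar_nonspace (by decide) h1.symm
    have n2 := vds_upperChar_nonspace (by decide) h2.symm
    have n3 := vds_upperChar_nonspace (by decide) h3.symm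
    have n4 := vds_upperChar_nonspace (by decide) h4.symm
    simp only [List.takeWhile_cons, n1, n2, n3, n4, Bool.not_false, if_true,
      List.map_cons, ← h1, ← h2, ← h3, ← h4]
    exact ⟨_, rfl⟩

-- a valid instruction starts with FROM iff it IS FROM
lemma vds_valid_from (w : String) (hw : w ∈ vdsValid) :
    PySem.Chars.startswith w.toList "FROM".toList = (w == "FROM") := by
  fin_cases hw <;> decide

-- a nonempty stripped string has a non-space head
lemma vds_strip_head (l : List Char) (c : Char)
    (h : (PySem.Chars.strip l).head? = some c) : PySem.Chars.isspace c = false := by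
  unfold PySem.Chars.strip at h
  set m := PySem.Chars.lstrip l with hm
  have hpre : PySem.Chars.rstrip m <+: m := by
    unfold PySem.Chars.rstrip
    have h2 := (List.dropWhile_suffix (l := m.reverse) PySem.Chars.isspace).reverse
    simpa using h2
  obtain ⟨t, ht⟩ := hpre
  have hne : PySem.Chars.rstrip m ≠ [] := by
    intro hx; rw [hx] at h; simp at h
  have hmh : m.head? = some c := by
    conv_lhs => rw [← ht]
    rw [List.head?_append, h]
    rfl
  rw [hm] at hmh
  exact vds_head?_dropWhile hmh

-- unfolded equation for vdsWord (definitional)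
lemma vdsWord_eq (l : String) :
    vdsWord l =
      (if PySem.Str.strip l != "" && !(PySem.Str.startswith (PySem.Str.strip l) "#") then
        (PySem.List.pyGet? (PySem.Str.split₀ (PySem.Str.strip l)) 0).map PySem.Str.upper
      else none) := rfl

-- unfolded cons equation for vdsCheckLoop (definitional)
lemma vdsCheckLoop_cons (line : String) (rest : List String) :
    vdsCheckLoop (line :: rest) =
      (if PySem.Str.strip line == "" || PySem.Str.startswith (PySem.Str.strip line) "#" then
        vdsCheckLoop rest
      else
        match PySem.List.pyGet? (PySem.Str.split₀ (PySem.Str.strip line)) 0 with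
        | some w =>
          if (vdsValid.contains (PySem.Str.upper w)) = false then false else vdsCheckLoop rest
        | none => true) := rfl

-- unfolded cons equation for vdsBLoop, phrased through vdsWord
set_option maxHeartbeats 1000000 in
lemma vdsBLoop_cons (line : String) (rest : List String) (seen : Bool) :
    vdsBLoop (line :: rest) seen =
      (match vdsWord line with
      | some w =>
        if !(vdsValid.contains w) then false
        else vdsBLoop rest (seen || (w == "FROM"))
      | none => vdsBLoop rest seen) := by
  rw [vdsBLoop, vdsWord]
  by_cases hcond :
      (PySem.Str.strip line != "" && !(PySem.Str.startswith (PySem.Str.strip line) "#")) = true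
  · rw [if_pos hcond, if_pos hcond]
    cases h : PySem.List.pyGet? (PySem.Str.split₀ (PySem.Str.strip line)) 0
    · rfl
    · rfl
  · rw [if_neg hcond, if_neg hcond]

-- the first word of a nonempty stripped line exists and is its non-space prefix
lemma vds_get_some (l : String) (he : PySem.Str.strip l ≠ "") :
    PySem.List.pyGet? (PySem.Str.split₀ (PySem.Str.strip l)) 0 =
      some (String.ofList
        ((PySem.Str.strip l).toList.takeWhile (fun c => !PySem.Chars.isspace c))) := by
  set s := PySem.Str.strip l with hs
  have hsl : s.toList ≠ [] := by
    intro hx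
    exact he (String.toList_inj.mp (by simp [hx]))
  have hh : ∀ c, s.toList.head? = some c → PySem.Chars.isspace c = false := by
    intro c hc
    apply vds_strip_head l.toList
    rw [← PySem.Str.toList_strip, ← hs]
    exact hc
  obtain ⟨tail, htail⟩ := vds_split₀_head s.toList hsl hh
  unfold PySem.Str.split₀
  rw [htail]
  simp [PySem.List.pyGet?, PySem.List.pyIdx?]

-- per-line: A's FROM test equals B's exact-first-word test, given the line's word is valid
set_option maxHeartbeats 1000000 in
lemma vds_line_from (l : String)
    (hok : ∀ w, vdsWord l = some w → vdsValid.contains w = true) :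
    PySem.Str.startswith (PySem.Str.upper (PySem.Str.strip l)) "FROM" =
      (vdsWord l == some "FROM") := by
  rw [vdsWord_eq]
  set s := PySem.Str.strip l with hs
  by_cases he : s = ""
  · rw [he]
    decide
  · by_cases hc : PySem.Str.startswith s "#" = true
    · -- comment line: upper s starts with '#', not 'F'
      have hsw : PySem.Str.startswith (PySem.Str.upper s) "FROM" = false := by
        rw [PySem.Str.startswith_eq] at hc ⊢
        rw [PySem.Str.toList_upper]
        rw [show ("#" : String).toList = ['#'] from rfl] at hc
        rw [PySem.Chars.startswith_iff] at hc
        obtain ⟨r, hr⟩ := hc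
        apply Bool.eq_false_iff.mpr
        intro hsw
        rw [PySem.Chars.startswith_iff] at hsw
        obtain ⟨r2, hr2⟩ := hsw
        rw [← hr] at hr2
        simp [PySem.Chars.upper, PySem.Chars.upperChar, PySem.Chars.islower] at hr2
      have hcond : (s != "" && !PySem.Str.startswith s "#") = false := by
        rw [hc]
        simp
      rw [hsw, hcond]
      simp
    · -- code line
      simp only [Bool.not_eq_true] at hc
      have hcond : (s != "" && !PySem.Str.startswith s "#") = true := by
        rw [hc]
        simp [he]
      rw [hcond]
      rw [show PySem.List.pyGet? (PySem.Str.split₀ s) 0 =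
            some (String.ofList (s.toList.takeWhile (fun c => !PySem.Chars.isspace c))) from
          hs ▸ vds_get_some l (hs ▸ he)]
      set t := s.toList.takeWhile (fun c => !PySem.Chars.isspace c) with htdef
      set W := PySem.Str.upper (String.ofList t) with hW
      have hWval : vdsValid.contains W = true := by
        apply hok
        rw [vdsWord_eq, ← hs, hcond]
        rw [show PySem.List.pyGet? (PySem.Str.split₀ s) 0 =
              some (String.ofList t) from hs ▸ htdef ▸ vds_get_some l (hs ▸ he)]
        simp [hW]
      have hWl : W.toList = PySem.Chars.upper t := by
        rw [hW, PySem.Str.toList_upper, String.toList_ofList]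
      have hmem : W ∈ vdsValid := by
        simpa using hWval
      have hkey : PySem.Str.startswith (PySem.Str.upper s) "FROM" = (W == "FROM") := by
        rw [PySem.Str.startswith_eq, PySem.Str.toList_upper]
        rw [← vds_take_from, ← htdef, ← hWl]
        exact vds_valid_from W hmem
      rw [hkey]
      simp [← hW]

-- per-line check A's loop performs (proof-only helper)
def vdsLineOk (l : String) : Bool :=
  match vdsWord l with
  | some w => vdsValid.contains w
  | none => true

-- A's loop is an 'all' over lines
lemma vds_any_congr {p q : String → Bool} :
    ∀ (l : List String), (∀ a ∈ l, p a = q a) → l.any p = l.any q := by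
  intro l h
  induction l with
  | nil => rfl
  | cons a t ih =>
    rw [List.any_cons, List.any_cons, h a (by simp), ih (fun b hb => h b (by simp [hb]))]

set_option maxHeartbeats 1000000 in
lemma vds_loop_all (lines : List String) :
    vdsCheckLoop lines = lines.all vdsLineOk := by
  induction lines with
  | nil => rfl
  | cons l rest ih =>
    rw [vdsCheckLoop_cons, List.all_cons, ih]
    by_cases hskip :
        (PySem.Str.strip l == "" || PySem.Str.startswith (PySem.Str.strip l) "#") = true
    · rw [if_pos hskip]
      have hcond :
          (PySem.Str.strip l != "" && !PySem.Str.startswith (PySem.Str.strip l) "#") = false := by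
        simp only [bne]
        rw [← Bool.not_or, hskip]
        rfl
      have hlok : vdsLineOk l = true := by
        unfold vdsLineOk
        rw [vdsWord_eq, hcond]
        rfl
      rw [hlok, Bool.true_and]
    · have hskip' :
          (PySem.Str.strip l == "" || PySem.Str.startswith (PySem.Str.strip l) "#") = false := by
        simpa using hskip
      rw [if_neg hskip]
      have hcond :
          (PySem.Str.strip l != "" && !PySem.Str.startswith (PySem.Str.strip l) "#") = true := by
        simp only [bne]
        rw [← Bool.not_or, hskip']
        rfl
      have he : PySem.Str.strip l ≠ "" := by
        intro hx
        rw [hx] at hskip'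
        simp at hskip'
      set W := PySem.Str.upper (String.ofList
        ((PySem.Str.strip l).toList.takeWhile (fun c => !PySem.Chars.isspace c))) with hWd
      have hw : vdsWord l = some W := by
        rw [vdsWord_eq, hcond, vds_get_some l he]
        rfl
      have hlok : vdsLineOk l = vdsValid.contains W := by
        unfold vdsLineOk
        rw [hw]
      rw [vds_get_some l he, hlok]
      have hWb : PySem.Str.upper (String.ofList
          ((PySem.Str.strip l).toList.takeWhile (fun c => !PySem.Chars.isspace c))) = W := rfl
      cases hv : vdsValid.contains W
      · simp only [hWb, hv]
        simp
      · simp only [hWb, hv]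
        simp

-- B's fused loop = A's all-valid check && (accumulator || some code line's first word is FROM)
lemma vds_bloop_eq : ∀ (lines : List String) (seen : Bool),
    vdsBLoop lines seen =
      (lines.all vdsLineOk &&
        (seen || lines.any (fun l => vdsWord l == some "FROM"))) := by
  intro lines
  induction lines with
  | nil => intro seen; simp [vdsBLoop]
  | cons l rest ih =>
    intro seen
    rw [vdsBLoop_cons, List.all_cons, List.any_cons]
    cases hw : vdsWord l with
    | none =>
      have hlok : vdsLineOk l = true := by unfold vdsLineOk; rw [hw]
      rw [hlok, ih]
      simp
    | some w =>
      have hlok : vdsLineOk l = vdsValid.contains w := by unfold vdsLineOk; rw [hw]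
      rw [hlok]
      cases hv : vdsValid.contains w
      · have hv' : ¬ w ∈ vdsValid := by simpa using hv
        simp [hv']
      · have hv' : w ∈ vdsValid := by simpa using hv
        simp [hv']
        rw [ih, Bool.or_assoc]

-- ===== VERDICT (by name: the statement is the Claim_ definition above) =====
theorem validate_dockerfile_syntax_spec : Claim_equal_validate_dockerfile_syntax := by
  intro content _
  unfold Spec_validate_dockerfile_syntax
  unfold validate_dockerfile_syntax validate_dockerfile_syntax_alt
  set lines := (PySem.Str.split? (PySem.Str.strip content) "\n").getD [] with hlines
  simp only
  rw [vds_loop_all, vds_bloop_eq]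
  by_cases hall : lines.all vdsLineOk = true
  · have hpt : ∀ l ∈ lines,
        PySem.Str.startswith (PySem.Str.upper (PySem.Str.strip l)) "FROM" =
          (vdsWord l == some "FROM") := by
      intro l hl
      apply vds_line_from
      intro w hw
      have hok := List.all_eq_true.mp hall l hl
      unfold vdsLineOk at hok
      rw [hw] at hok
      exact hok
    rw [vds_any_congr lines hpt, hall]
    cases lines.any (fun l => vdsWord l == some "FROM") <;> simp
  · simp only [Bool.not_eq_true] at hall
    rw [hall]
    simp only [Bool.false_and]
    cases lines.any (fun l =>
        PySem.Str.startswith (PySem.Str.upper (PySem.Str.strip l)) "FROM") <;> simp
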